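-- pv_equiv track=rewrite | github.com/huangshiyang/RIMEL | getFileChangedLine.py | file_only_deletion
-- ===== SOURCE A (Python) =====
-- def file_only_deletion(file):
--     tab = []
--     tab = file.split('\n')
--     deletion = False
--     for i in range(0, len(tab)):
--         ligne = tab[i]
--         if (ligne[0] == "+"):
--             return False
--         if (ligne[0] == "-"):
--             deletion = True
--     if deletion:
--         return True
--     return False
-- ===== SOURCE B (Python) =====
-- def file_only_deletion(file):
--     lines = file.split('\n')
--     if any(l[0] == "+" for l in lines):
--         return False
--     return any(l[0] == "-" for l in lines)
-- ===== Notes on version B (the rewrite author's own statement) =====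
-- stated objective: idiomatic
-- what changed: Replaced A's single indexed loop with an accumulator flag and early return by two declarative any() existence scans ('+' first, then '-'), with no loop state.
import Mathlib
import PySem

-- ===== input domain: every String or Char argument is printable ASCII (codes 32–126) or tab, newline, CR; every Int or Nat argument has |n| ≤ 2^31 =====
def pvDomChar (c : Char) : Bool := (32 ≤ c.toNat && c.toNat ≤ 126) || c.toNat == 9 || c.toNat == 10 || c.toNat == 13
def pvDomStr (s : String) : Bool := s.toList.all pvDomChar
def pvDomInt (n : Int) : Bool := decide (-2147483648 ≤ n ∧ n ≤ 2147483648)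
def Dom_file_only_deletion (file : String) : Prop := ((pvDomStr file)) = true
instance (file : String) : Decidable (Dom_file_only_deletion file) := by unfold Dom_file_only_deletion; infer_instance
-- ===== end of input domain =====

-- B replaces A's single indexed loop with a flag and early return by two independent
-- existence scans ('+' first, then '-'); same cost, more idiomatic.

-- ===== PORT A =====
-- A's for-loop over range(len(tab)) with the 'deletion' flag, as structural recursion
-- carrying the flag; ligne[0] on an empty line is an IndexError (excluded by Pre_),
-- the 'false' in the none branch is never reached under Pre_.
def pvLoopA : List String → Bool → Bool
  | [], deletion => deletion
  | ligne :: rest, deletion =>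
    match PySem.Str.pyGet? ligne 0 with
    | none => false
    | some c =>
      if c = '+' then false
      else if c = '-' then pvLoopA rest true
      else pvLoopA rest deletion

def file_only_deletion (file : String) : Bool :=
  let tab := (PySem.Str.split? file "\n").getD []
  pvLoopA tab false

-- ===== PORT B =====
-- any(l[0] == c for l in lines): short-circuits at the first match; an empty line hit
-- before a match is Python's IndexError (excluded by Pre_), modelled by the none branch.
def pvAnyHead (c : Char) : List String → Bool
  | [] => false
  | l :: rest =>
    match PySem.Str.pyGet? l 0 with
    | none => false
    | some c' => if c' = c then true else pvAnyHead c rest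

def file_only_deletion_alt (file : String) : Bool :=
  let lines := (PySem.Str.split? file "\n").getD []
  if pvAnyHead '+' lines then false
  else pvAnyHead '-' lines

-- ===== PRECONDITION & SPEC =====
-- Pre_ excludes exactly the inputs where A raises IndexError: a line that is empty and is
-- not preceded by a '+'-starting line (on which A would already have returned False).
def Pre_file_only_deletion (file : String) : Prop :=
  let tab := (PySem.Str.split? file "\n").getD []
  ∀ i < tab.length, tab.getD i "" = "" →
    ∃ j < i, PySem.Str.pyGet? (tab.getD j "") 0 = some '+'
instance (file : String) : Decidable (Pre_file_only_deletion file) := by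
  unfold Pre_file_only_deletion; infer_instance

def pvWitness_file_only_deletion : String := "-a\nkeep"

def Spec_file_only_deletion (file : String) (out : Bool) : Prop := out = file_only_deletion_alt file
instance (file : String) (out : Bool) : Decidable (Spec_file_only_deletion file out) := by unfold Spec_file_only_deletion; infer_instance

-- ===== CLAIM (what is proved, stated in full; the proofs are below) =====
def Claim_equal_file_only_deletion : Prop := ∀ (file : String), Dom_file_only_deletion file → Pre_file_only_deletion file → Spec_file_only_deletion file (file_only_deletion file)

-- ===== LEMMAS AND PROOFS =====

-- the list-level precondition: no empty line before the first '+'-line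
def pvPreL (L : List String) : Prop :=
  ∀ i < L.length, L.getD i "" = "" → ∃ j < i, PySem.Str.pyGet? (L.getD j "") 0 = some '+'

lemma pvPreL_tail {l : String} {rest : List String} (h : pvPreL (l :: rest))
    (hl : PySem.Str.pyGet? l 0 ≠ some '+') : pvPreL rest := by
  intro i hi he
  obtain ⟨j, hj, hp⟩ := h (i + 1) (by simpa using Nat.succ_lt_succ hi) (by simpa using he)
  cases j with
  | zero => exact absurd hp hl
  | succ k => exact ⟨k, by omega, by simpa using hp⟩

lemma pvPreL_head {l : String} {rest : List String} (h : pvPreL (l :: rest)) :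
    l ≠ "" := by
  intro he
  obtain ⟨j, hj, _⟩ := h 0 (by simp) (by simpa using he)
  omega

lemma pvHead_some {l : String} (h : l ≠ "") : ∃ c, PySem.Str.pyGet? l 0 = some c := by
  cases hl : l.toList with
  | nil => exact absurd (by simpa using congrArg String.ofList hl) h
  | cons c cs => exact ⟨c, by simp [hl]⟩

lemma pvMain (L : List String) (h : pvPreL L) (d : Bool) :
    pvLoopA L d = if pvAnyHead '+' L then false else (d || pvAnyHead '-' L) := by
  induction L generalizing d with
  | nil => simp [pvLoopA, pvAnyHead]
  | cons l rest ih =>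
    obtain ⟨c, hc⟩ := pvHead_some (pvPreL_head h)
    have hc' : PySem.List.pyGet? l.toList 0 = some c := by simpa using hc
    by_cases hplus : c = '+'
    · subst hplus; simp [pvLoopA, pvAnyHead, hc']
    · have hrest := pvPreL_tail h (by simp [hc', hplus])
      by_cases hminus : c = '-'
      · subst hminus
        simp only [pvLoopA, pvAnyHead, PySem.Str.pyGet?_eq, PySem.Chars.pyGet?_eq_listPyGet?, hc']
        rw [ih hrest true]
        cases pvAnyHead '+' rest <;> simp
      · simp only [pvLoopA, pvAnyHead, PySem.Str.pyGet?_eq, PySem.Chars.pyGet?_eq_listPyGet?, hc']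
        simp [hplus, hminus, ih hrest d]

-- ===== VERDICT (by name: the statement is the Claim_ definition above) =====
theorem file_only_deletion_spec : Claim_equal_file_only_deletion := by
  intro file _ hpre
  unfold Spec_file_only_deletion file_only_deletion file_only_deletion_alt
  have := pvMain ((PySem.Str.split? file "\n").getD []) hpre false
  simpa using this
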